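-- pv_equiv track=rewrite | github.com/elip12/psl-gwas | psl-gwas/extra/evaluate.py | unitig_in_truths
-- ===== SOURCE A (Python) =====
-- def complement(s):
--     m = str.maketrans('ATCG', 'TAGC')
--     return s.translate(m)
--
-- def chunkify(unitig):
--     size = 60
--     rem = len(unitig) % size
--     for i in range(0, len(unitig) - rem, size):
--         # if next chunk would be smaller than size, add it to this chunk
--         if len(unitig) - (i + size) < size:
--             yield unitig[i:]
--         else:
--             yield unitig[i: i + size]
--
-- def unitig_in_truths(unitig, truths, pheno):
--     seqs = truths.get(pheno, None)
--     if seqs is None: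
--         return False
--     for name, seq in seqs:
--         if len(unitig) > 60:
--             for unitigchunk in chunkify(unitig):
--                 comp = complement(unitigchunk)
--                 if unitigchunk in seq or seq in unitigchunk or comp in seq or seq in comp:
--                     return True
--         else:
--             comp = complement(unitig)
--             if unitig in seq or seq in unitig or comp in seq or seq in comp:
--                 return True
--     return False
-- ===== SOURCE B (Python) =====
-- def complement(s):
--     m = str.maketrans('ATCG', 'TAGC')
--     return s.translate(m)
--
-- def _split(u):
--     # recursive chunking: peel 60-char head chunks; the final chunk keeps 60..119 chars
--     if len(u) < 120:
--         return [u]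
--     return [u[:60]] + _split(u[60:])
--
-- def unitig_in_truths(unitig, truths, pheno):
--     seqs = truths.get(pheno)
--     if seqs is None:
--         return False
--     pats = _split(unitig) if len(unitig) > 60 else [unitig]
--     # complement is an involutive per-character map, so 'complement(p) in seq'
--     # iff 'p in complement(seq)' (and symmetrically): complement each truth
--     # sequence once instead of complementing every chunk.
--     return any(
--         p in seq or seq in p or p in cseq or cseq in p
--         for _, seq in seqs
--         for cseq in (complement(seq),)
--         for p in pats
--     )
-- ===== Notes on version B (the rewrite author's own statement) =====
-- stated objective: alternative
-- what changed: B replaces the range-stepping chunk generator with a recursive 60-char peel, and exploits that complement is an involutive per-character map: it complements each truth sequence once and tests 'p in cseq'/'cseq in p' instead of complementing every chunk per sequence; the scan becomes a single any-comprehension instead of early-return loops.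
import Mathlib
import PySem

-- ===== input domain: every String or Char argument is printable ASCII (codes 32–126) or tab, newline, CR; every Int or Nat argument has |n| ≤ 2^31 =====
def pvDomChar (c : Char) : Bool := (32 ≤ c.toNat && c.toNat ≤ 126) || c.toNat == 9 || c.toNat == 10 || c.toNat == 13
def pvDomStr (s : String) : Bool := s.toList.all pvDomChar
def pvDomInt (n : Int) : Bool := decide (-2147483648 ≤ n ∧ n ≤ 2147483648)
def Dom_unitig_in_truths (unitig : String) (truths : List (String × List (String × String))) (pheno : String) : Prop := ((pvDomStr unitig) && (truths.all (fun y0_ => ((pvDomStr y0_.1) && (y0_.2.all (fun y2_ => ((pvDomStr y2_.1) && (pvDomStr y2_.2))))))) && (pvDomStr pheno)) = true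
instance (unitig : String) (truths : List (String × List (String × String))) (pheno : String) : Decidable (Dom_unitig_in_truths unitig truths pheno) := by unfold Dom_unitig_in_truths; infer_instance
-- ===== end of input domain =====

-- B chunks by recursively peeling 60-char heads and, since complement is an involutive
-- per-char map, complements each truth sequence once instead of every chunk; objective: alternative.

-- ===== PORT A =====
def pyCompChar (c : Char) : Char :=
  if c = 'A' then 'T' else if c = 'T' then 'A' else if c = 'C' then 'G' else if c = 'G' then 'C' else c

-- complement(s): str.maketrans('ATCG','TAGC'); s.translate(m)  (per-char table, others unchanged; exact)
def pyComplement (s : List Char) : List Char := s.map pyCompChar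

-- chunkify(unitig): the generator, materialised as the list of its yields
def pyChunkify (u : List Char) : List (List Char) :=
  (PySem.List.pyRange 0 ((u.length : Int) - ((u.length % 60 : Nat) : Int)) 60).map
    (fun i =>
      if (u.length : Int) - (i + 60) < 60 then PySem.List.slice u (some i) none
      else PySem.List.slice u (some i) (some (i + 60)))

-- the 'for name, seq in seqs' loop of A, with its early returns
def pyLoopA (u : List Char) (seqs : List (String × String)) : Bool :=
  match seqs with
  | [] => false
  | (_, seq) :: rest =>
    let s := seq.toList
    if 60 < u.length then
      if (pyChunkify u).any (fun ch =>
            let comp := pyComplement ch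
            PySem.Chars.isIn ch s || PySem.Chars.isIn s ch ||
            PySem.Chars.isIn comp s || PySem.Chars.isIn s comp)
      then true else pyLoopA u rest
    else
      let comp := pyComplement u
      if PySem.Chars.isIn u s || PySem.Chars.isIn s u ||
         PySem.Chars.isIn comp s || PySem.Chars.isIn s comp
      then true else pyLoopA u rest

def unitig_in_truths (unitig : String) (truths : List (String × List (String × String))) (pheno : String) : Bool :=
  match (PySem.Dict.mk truths).get? pheno with
  | none => false
  | some seqs => pyLoopA unitig.toList seqs

-- ===== PORT B =====
-- _split(u): recursive 60-char peel; u[:60] / u[60:] with literal nonneg bounds are take/drop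
def altSplit (u : List Char) : List (List Char) :=
  if u.length < 120 then [u]
  else u.take 60 :: altSplit (u.drop 60)
termination_by u.length
decreasing_by simp; omega

def unitig_in_truths_alt (unitig : String) (truths : List (String × List (String × String))) (pheno : String) : Bool :=
  match (PySem.Dict.mk truths).get? pheno with
  | none => false
  | some seqs =>
    let u := unitig.toList
    let pats := if 60 < u.length then altSplit u else [u]
    seqs.any (fun ns =>
      let s := ns.2.toList
      let cs := pyComplement s
      pats.any (fun p =>
        PySem.Chars.isIn p s || PySem.Chars.isIn s p ||
        PySem.Chars.isIn p cs || PySem.Chars.isIn cs p))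

-- ===== PRECONDITION & SPEC =====
def Spec_unitig_in_truths (unitig : String) (truths : List (String × List (String × String))) (pheno : String) (out : Bool) : Prop := out = unitig_in_truths_alt unitig truths pheno
instance (unitig : String) (truths : List (String × List (String × String))) (pheno : String) (out : Bool) : Decidable (Spec_unitig_in_truths unitig truths pheno out) := by unfold Spec_unitig_in_truths; infer_instance

-- ===== CLAIM =====
def Claim_equal_unitig_in_truths : Prop := ∀ (unitig : String) (truths : List (String × List (String × String))) (pheno : String), Dom_unitig_in_truths unitig truths pheno → Spec_unitig_in_truths unitig truths pheno (unitig_in_truths unitig truths pheno)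

-- ===== LEMMAS AND PROOFS =====
theorem pyRange_pos_cons (a b s : Int) (hab : a < b) (hs : 0 < s) :
    PySem.List.pyRange a b s = a :: PySem.List.pyRange (a + s) b s := by
  rw [PySem.List.pyRange_of_pos _ _ hs, PySem.List.pyRange_of_pos _ _ hs]
  have hs' : s ≠ 0 := by omega
  have hkey : (b - a + s - 1) / s = (b - (a + s) + s - 1) / s + 1 := by
    have h := Int.add_mul_ediv_right (b - (a + s) + s - 1) 1 hs'
    have e : b - a + s - 1 = b - (a + s) + s - 1 + 1 * s := by ring
    rw [e, h]
  have hnn : 0 ≤ (b - (a + s) + s - 1) / s := Int.ediv_nonneg (by omega) (by omega)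
  have h1 : ((b - a + s - 1) / s).toNat = ((b - (a + s) + s - 1) / s).toNat + 1 := by omega
  by_cases h2 : a + s < b
  · rw [if_pos hab, if_pos h2, h1, List.range_succ_eq_map]
    simp only [List.map_cons, List.map_map]
    congr 1
    · simp
    · apply List.map_congr_left; intro k _; simp [Function.comp]; ring
  · have hz : (b - (a + s) + s - 1) / s = 0 := Int.ediv_eq_zero_of_lt (by omega) (by omega)
    rw [if_pos hab, if_neg h2, h1, hz]
    simp

theorem pyRange_pos_nil (a b s : Int) (hab : b ≤ a) (hs : 0 < s) :
    PySem.List.pyRange a b s = [] := by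
  rw [PySem.List.pyRange_of_pos _ _ hs, if_neg (by omega)]; rfl

theorem pyRange_pos_shift (a b s : Int) (hs : 0 < s) :
    PySem.List.pyRange (a + s) b s = (PySem.List.pyRange a (b - s) s).map (· + s) := by
  rw [PySem.List.pyRange_of_pos _ _ hs, PySem.List.pyRange_of_pos _ _ hs]
  have hn : b - (a + s) + s - 1 = b - s - a + s - 1 := by ring
  by_cases h2 : a + s < b
  · rw [if_pos h2, if_pos (show a < b - s by omega), hn, List.map_map]
    apply List.map_congr_left; intro k _; simp [Function.comp]; ring
  · rw [if_neg h2, if_neg (show ¬ a < b - s by omega)]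
    simp

theorem mem_pyRange_pos_nonneg {b s i : Int} (hs : 0 < s) (h : i ∈ PySem.List.pyRange 0 b s) : 0 ≤ i := by
  rw [PySem.List.pyRange_of_pos _ _ hs] at h
  simp only [List.mem_map, List.mem_range] at h
  obtain ⟨k, _, hk⟩ := h
  have : (0:Int) ≤ s * k := by positivity
  omega

-- the recursive peel computes exactly A's chunk list (for unitigs longer than 60)
theorem chunk_eq_aux : ∀ (n : Nat) (u : List Char), u.length ≤ n → 60 ≤ u.length →
    pyChunkify u = altSplit u := by
  intro n
  induction n with
  | zero => intro u hu h; omega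
  | succ m ih =>
    intro u hu h
    unfold pyChunkify altSplit
    by_cases hlt : u.length < 120
    · have hmod : u.length % 60 = u.length - 60 := by omega
      have ht : ((u.length : Int) - ((u.length % 60 : Nat) : Int)) = 60 := by
        rw [hmod]; omega
      rw [ht, pyRange_pos_cons 0 60 60 (by omega) (by omega),
          pyRange_pos_nil (0 + 60) 60 60 (by omega) (by omega)]
      simp only [List.map_cons, List.map_nil, if_pos hlt]
      rw [if_pos (by push_cast; omega)]
      simp [PySem.List.slice]
    · -- u.length ≥ 120
      have hmod : (u.drop 60).length % 60 = u.length % 60 := by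
        simp only [List.length_drop]; omega
      have ht : ((u.length : Int) - ((u.length % 60 : Nat) : Int)) ≥ 120 := by
        have := Nat.mod_lt u.length (show 0 < 60 by omega)
        push_cast; omega
      rw [pyRange_pos_cons 0 _ 60 (by omega) (by omega)]
      simp only [List.map_cons, if_neg hlt]
      congr 1
      · rw [if_neg (by push_cast; omega)]
        rw [show ((0:Int) + 60) = 60 by norm_num]
        rw [PySem.List.slice_toNat _ (by norm_num) (by norm_num)]
        simp
      · rw [pyRange_pos_shift 0 _ 60 (by omega)]
        rw [List.map_map]
        have hrec : pyChunkify (u.drop 60) = altSplit (u.drop 60) := by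
          apply ih
          · simp only [List.length_drop]; omega
          · simp only [List.length_drop]; omega
        rw [← hrec]
        unfold pyChunkify
        have harg : ((u.drop 60).length : Int) - (((u.drop 60).length % 60 : Nat) : Int)
            = (u.length : Int) - ((u.length % 60 : Nat) : Int) - 60 := by
          rw [hmod]; simp only [List.length_drop]; push_cast; omega
        rw [harg]
        apply List.map_congr_left
        intro i hi
        have hi0 : 0 ≤ i := mem_pyRange_pos_nonneg (by omega) hi
        simp only [Function.comp, List.length_drop]
        by_cases hc : ((u.length : Int) - (i + 60 + 60) < 60)
        · rw [if_pos hc, if_pos (show ((u.length - 60 : Nat) : Int) - (i + 60) < 60 by omega)]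
          rw [PySem.List.slice_from _ (by omega), PySem.List.slice_from _ (by omega)]
          rw [List.drop_drop]
          congr 1
          omega
        · rw [if_neg hc, if_neg (show ¬ ((u.length - 60 : Nat) : Int) - (i + 60) < 60 by omega)]
          rw [PySem.List.slice_toNat _ (by omega) (by omega),
              PySem.List.slice_toNat _ (by omega) (by omega)]
          rw [List.drop_drop]
          have e1 : (i + 60).toNat = i.toNat + 60 := by omega
          have e2 : (i + 60 + 60).toNat = i.toNat + 120 := by omega
          rw [e1, e2]
          congr 1
          · omega
          · rw [Nat.add_comm]

theorem chunk_eq (u : List Char) (h : 60 < u.length) : pyChunkify u = altSplit u :=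
  chunk_eq_aux u.length u (le_refl _) (le_of_lt h)

-- complement is an involutive per-character map …
theorem pyCompChar_invol (c : Char) : pyCompChar (pyCompChar c) = c := by
  unfold pyCompChar
  split_ifs <;> simp_all

-- … so 'complement(p) in s' iff 'p in complement(s)', and symmetrically
theorem infix_comp_left (p s : List Char) : pyComplement p <:+: s ↔ p <:+: pyComplement s := by
  unfold pyComplement
  constructor
  · intro h
    have := h.map pyCompChar
    simpa [List.map_map, Function.comp_def, pyCompChar_invol] using this
  · intro h
    have := h.map pyCompChar
    simpa [List.map_map, Function.comp_def, pyCompChar_invol] using this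

theorem isIn_comp_left (p s : List Char) :
    PySem.Chars.isIn (pyComplement p) s = PySem.Chars.isIn p (pyComplement s) := by
  rw [Bool.eq_iff_iff, PySem.Chars.isIn_iff_infix, PySem.Chars.isIn_iff_infix]
  exact infix_comp_left p s

theorem isIn_comp_right (p s : List Char) :
    PySem.Chars.isIn s (pyComplement p) = PySem.Chars.isIn (pyComplement s) p := by
  rw [Bool.eq_iff_iff, PySem.Chars.isIn_iff_infix, PySem.Chars.isIn_iff_infix]
  constructor
  · intro h
    have := h.map pyCompChar
    simpa [pyComplement, List.map_map, Function.comp_def, pyCompChar_invol] using this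
  · intro h
    have := h.map pyCompChar
    simpa [pyComplement, List.map_map, Function.comp_def, pyCompChar_invol] using this

-- A's per-seq check equals B's per-seq check (patterns fixed, sequence complemented once)
theorem innerA_eq_alt (u s : List Char) :
    (if 60 < u.length then
       (pyChunkify u).any (fun ch =>
          let comp := pyComplement ch
          PySem.Chars.isIn ch s || PySem.Chars.isIn s ch ||
          PySem.Chars.isIn comp s || PySem.Chars.isIn s comp)
     else
       let comp := pyComplement u
       PySem.Chars.isIn u s || PySem.Chars.isIn s u ||
       PySem.Chars.isIn comp s || PySem.Chars.isIn s comp)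
    = (if 60 < u.length then altSplit u else [u]).any (fun p =>
        PySem.Chars.isIn p s || PySem.Chars.isIn s p ||
        PySem.Chars.isIn p (pyComplement s) || PySem.Chars.isIn (pyComplement s) p) := by
  by_cases h : 60 < u.length
  · rw [if_pos h, if_pos h, ← chunk_eq u h]
    congr 1
    funext ch
    dsimp only
    rw [isIn_comp_left ch s, isIn_comp_right ch s]
  · rw [if_neg h, if_neg h]
    dsimp only
    simp only [List.any_cons, List.any_nil, Bool.or_false]
    rw [isIn_comp_left u s, isIn_comp_right u s]

-- A's early-return loop over seqs is 'any' of the per-seq check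
theorem pyLoopA_eq_any (u : List Char) (seqs : List (String × String)) :
    pyLoopA u seqs
    = seqs.any (fun ns =>
        (if 60 < u.length then altSplit u else [u]).any (fun p =>
          PySem.Chars.isIn p ns.2.toList || PySem.Chars.isIn ns.2.toList p ||
          PySem.Chars.isIn p (pyComplement ns.2.toList) ||
          PySem.Chars.isIn (pyComplement ns.2.toList) p)) := by
  induction seqs with
  | nil => rfl
  | cons pr rest ih =>
    obtain ⟨n, sq⟩ := pr
    rw [pyLoopA]
    simp only [← innerA_eq_alt u sq.toList, List.any_cons, ih]
    split_ifs with h1 h2 <;> simp_all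

-- ===== VERDICT =====
theorem unitig_in_truths_spec : Claim_equal_unitig_in_truths := by
  intro unitig truths pheno _
  unfold Spec_unitig_in_truths unitig_in_truths unitig_in_truths_alt
  cases h : (PySem.Dict.mk truths).get? pheno with
  | none => rfl
  | some seqs => dsimp only; rw [pyLoopA_eq_any]
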